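-- pv_equiv track=rewrite | github.com/yeongseoPark/python_coding_test | greedy/live_mukbang.py | solution
-- ===== SOURCE A (Python) =====
-- import heapq # 우선순위 큐 https://m.blog.naver.com/jjys9047/222075711112
--
-- def solution(food_times, k): #음식먹는데 필요한 시간이 음식 번호 순서로 배열 / 방송이 중단된 시간
--     answer = -1 # answer 못 구할 경우: -1
--
--     # 시간이 작은 순서대로 빼기 위해, 최소값 우선순위로 하는 우선순위 큐 사용
--     q = []
--     for i in range(len(food_times)):
--         heapq.heappush(q,(food_times[i], i+1)) # 모든 음식을 (음식 시간, 음식 번호)의 형태로 우선순위 큐에 삽입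
--
--     previous  = 0  # 직전에 다 먹은 음식의 시간
--     length    = len(food_times) # 남은 음식 개수
--
--     while q:
--         # 가장 적은 섭취시간 - 전 음식의 섭취시간 곱하기 음식개수 -> 음식 하나 다먹는데 걸리는 시간
--         # 전 음식을 빼주는 이유는, 이전 음식을 먹을때에도 현재 음식을 먹기 때문
--         diff = (q[0][0] - previous) * length
--         # 음식하나 다 먹는 사이클 돌려도 그 시간이 k보다 적을때
--         if diff <= k:
--             k -= diff # 음식하나 다 먹는데 걸리는 소요시간 k에서 빼줌
--             length -= 1 # 음식 다먹었으니 제외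
--             previous, _ = heapq.heappop(q) #음식 리스트에서 제외, previous에 이 음식 섭취시간 기록
--         else: # 더이상 사이클 돌릴 수 없음
--             idx = k % length # 남은 시간 % 남은 음식 종류 수 => 남은 k초동안 남은 음식 먹으면 마지막은 몇번째?
--             q.sort(key=lambda x:x[1]) #큐를 음식 번호 순으로 정렬
--
--             answer = q[idx][1]
--             break
--     return answer
-- ===== SOURCE B (Python) =====
-- def solution(food_times, k):
--     # Parametric search: instead of simulating the eating process, binary-search the
--     # threshold time x (smallest value whose total round-robin cost exceeds k),
--     # then answer by counting/filtering against x.  cost(x) = sum(min(t, x)) is the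
--     # total time spent once every food needing < x is finished and the rest have
--     # been eaten for x time each; it is monotone in x.
--     n = len(food_times)
--     if n == 0:
--         return -1
--     if sum(food_times) <= k:
--         return -1
--     def cost(x):
--         return sum(min(t, x) for t in food_times)
--     lo, hi = min(food_times), max(food_times)
--     while lo < hi:  # invariant: cost(hi) > k, cost(y) <= k for lo0 <= y < lo
--         mid = (lo + hi) // 2
--         if cost(mid) > k:
--             hi = mid
--         else:
--             lo = mid + 1
--     x = lo  # foods with time < x are fully eaten; the rest remain
--     prev = max((t for t in food_times if t < x), default=0)
--     eaten = sum(1 for t in food_times if t < x)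
--     consumed = sum(t for t in food_times if t < x) + (n - eaten) * prev
--     r = k - consumed
--     remaining = [i + 1 for i, t in enumerate(food_times) if t >= x]
--     return remaining[r % (n - eaten)]
-- ===== Notes on version B (the rewrite author's own statement) =====
-- stated objective: alternative
-- what changed: Replaces the heap-based step-by-step eating simulation with a parametric search: binary search on the threshold time x using the monotone cost(x)=sum(min(t,x)), then compute the answer by counting and filtering against x with no priority queue and no per-food loop state.
import Mathlib
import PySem

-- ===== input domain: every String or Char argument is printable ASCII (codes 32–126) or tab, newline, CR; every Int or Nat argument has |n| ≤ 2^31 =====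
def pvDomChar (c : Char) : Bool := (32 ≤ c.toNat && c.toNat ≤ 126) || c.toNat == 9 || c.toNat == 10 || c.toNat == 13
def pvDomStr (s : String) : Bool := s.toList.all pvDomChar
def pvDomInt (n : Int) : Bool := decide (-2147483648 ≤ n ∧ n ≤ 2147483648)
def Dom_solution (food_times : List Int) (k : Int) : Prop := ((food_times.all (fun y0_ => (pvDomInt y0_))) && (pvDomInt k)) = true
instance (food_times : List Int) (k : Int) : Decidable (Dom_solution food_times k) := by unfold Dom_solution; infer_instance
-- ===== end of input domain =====

-- B replaces A's heap-based step simulation with a parametric binary search on the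
-- threshold time x (monotone cost(x) = Σ min(t,x)), then counts/filters against x.


-- ===== PORT A =====
-- heapq modelled as an ordered list kept sorted in heapq's (time, number) tuple order:
-- heappush inserts in order, q[0] is the head, heappop removes the head — exact for the
-- heap operations this program performs (q[0] = minimum, heappop returns the minimum).
def heappushLex (q : List (Int × Int)) (x : Int × Int) : List (Int × Int) :=
  PySem.List.insertBy (fun a b => decide (a.1 < b.1 ∨ (a.1 = b.1 ∧ a.2 < b.2))) x q

def aLoop (q : List (Int × Int)) (previous k length : Int) : Int :=
  match q with
  | [] => -1
  | (t0, _i0) :: rest =>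
    let diff := (t0 - previous) * length
    if diff ≤ k then
      aLoop rest t0 (k - diff) (length - 1)
    else
      let idx := PySem.Int.mod k length
      -- q.sort(key=lambda x: x[1]); answer = q[idx][1]  (index always in range in A)
      match PySem.List.pyGet? (PySem.List.sorted ((t0, _i0) :: rest) (fun x => x.2) false) idx with
      | some pr => pr.2
      | none => -1

def solution (food_times : List Int) (k : Int) : Int :=
  let q := (PySem.List.pyRange 0 (PySem.List.len food_times) 1).foldl
    (fun q i => heappushLex q (PySem.List.pyGetD food_times i 0, i + 1)) []
  aLoop q 0 k (PySem.List.len food_times)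

-- ===== PORT B =====
-- cost(x) = sum(min(t, x) for t in food_times)
def pvCost (food_times : List Int) (x : Int) : Int :=
  (food_times.map (fun t => min t x)).sum

-- while lo < hi: mid = (lo+hi)//2; if cost(mid) > k: hi = mid else lo = mid+1
def pvBsearch (food_times : List Int) (k lo hi : Int) : Int :=
  if lo < hi then
    let mid := PySem.Int.floordiv (lo + hi) 2
    if k < pvCost food_times mid then pvBsearch food_times k lo mid
    else pvBsearch food_times k (mid + 1) hi
  else lo
termination_by (hi - lo).toNat
decreasing_by
  all_goals
    rw [PySem.Int.floordiv_eq_ediv_of_pos (by omega : (0:Int) < 2)]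
    omega

def solution_alt (food_times : List Int) (k : Int) : Int :=
  if food_times.length = 0 then -1
  else if food_times.sum ≤ k then -1
  else
    let x := pvBsearch food_times k ((PySem.List.min? food_times (fun t => t)).getD 0)
      ((PySem.List.max? food_times (fun t => t)).getD 0)
    let eatenL := food_times.filter (fun t => decide (t < x))
    let prev := (PySem.List.max? eatenL (fun t => t)).getD 0   -- max(gen, default=0)
    let consumed := eatenL.sum + ((food_times.length : Int) - eatenL.length) * prev
    let r := k - consumed
    -- [i+1 for i, t in enumerate(food_times) if t >= x]
    let remaining := ((PySem.List.enumerate food_times 0).filter (fun q => decide (x ≤ q.2))).map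
      (fun q => q.1 + 1)
    -- remaining[r % (n - eaten)]; the index is provably in range, none is unreachable
    match PySem.List.pyGet? remaining
        (PySem.Int.mod r ((food_times.length : Int) - eatenL.length)) with
    | some v => v
    | none => -1

-- ===== PRECONDITION & SPEC =====
def Spec_solution (food_times : List Int) (k : Int) (out : Int) : Prop := out = solution_alt food_times k
instance (food_times : List Int) (k : Int) (out : Int) : Decidable (Spec_solution food_times k out) := by unfold Spec_solution; infer_instance

-- ===== CLAIM (what is proved, stated in full; the proofs are below) =====
def Claim_equal_solution : Prop := ∀ (food_times : List Int) (k : Int), Dom_solution food_times k → Spec_solution food_times k (solution food_times k)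

-- ===== LEMMAS AND PROOFS =====

-- proof-layer intermediate: the pointer walk over the pre-sorted (time, number) list;
-- A's heap loop is proved equal to it (loop_eq), and it is proved equal to B (walk lemmas)
def bWalk (order : List (Int × Int)) (p : Nat) (previous k : Int) : Int :=
  if h : p < order.length then
    let t := (order[p]).1
    let len : Int := (order.length : Int) - p
    let diff := (t - previous) * len
    if diff ≤ k then
      bWalk order (p + 1) t (k - diff)
    else
      let remaining := PySem.List.sorted ((order.drop p).map Prod.snd) (fun x => x) false
      match PySem.List.pyGet? remaining (PySem.Int.mod k len) with
      | some v => v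
      | none => -1
  else -1
termination_by order.length - p

theorem insertBy_congr {α : Type} (f g : α → α → Bool) (x : α) :
    ∀ (acc : List α), (∀ y ∈ acc, f x y = g x y) → PySem.List.insertBy f x acc = PySem.List.insertBy g x acc := by
  intro acc
  induction acc with
  | nil => intro _; rfl
  | cons y ys ih =>
    intro h
    simp only [PySem.List.insertBy]
    rw [h y (by simp)]
    by_cases hg : g x y = true
    · simp [hg]
    · simp [hg, ih (fun z hz => h z (by simp [hz]))]

theorem mem_heappushLex {x y : Int × Int} {acc : List (Int × Int)}
    (h : y ∈ heappushLex acc x) : y = x ∨ y ∈ acc := by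
  have := PySem.List.mem_insertBy
    (before := fun a b => decide (a.1 < b.1 ∨ (a.1 = b.1 ∧ a.2 < b.2))) (x := x) (ys := acc) (y := y)
  unfold heappushLex at h
  exact this.mp h

-- folding heapq pushes over pairs whose numbers strictly exceed everything already in the
-- accumulator coincides with the stable insertion sort by time only
theorem foldl_push_eq_foldl_fst :
    ∀ (ps : List (Int × Int)) (acc : List (Int × Int)),
      List.Pairwise (fun a b => a.2 < b.2) ps →
      (∀ x ∈ ps, ∀ y ∈ acc, y.2 < x.2) →
      ps.foldl heappushLex acc =
        ps.foldl (fun acc x => PySem.List.insertBy (fun a b => decide ((fun z : Int × Int => z.1) a < (fun z : Int × Int => z.1) b)) x acc) acc := by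
  intro ps
  induction ps with
  | nil => intro acc _ _; rfl
  | cons x t ih =>
    intro acc hpw hgt
    simp only [List.foldl_cons]
    have hx : heappushLex acc x =
        PySem.List.insertBy (fun a b => decide ((fun z : Int × Int => z.1) a < (fun z : Int × Int => z.1) b)) x acc := by
      unfold heappushLex
      apply insertBy_congr
      intro y hy
      have hlt : y.2 < x.2 := hgt x (by simp) y hy
      simp only [decide_eq_decide]
      constructor
      · rintro (h1 | ⟨h1, h2⟩)
        · exact h1
        · omega
      · intro h1; exact Or.inl h1
    rw [hx]
    apply ih
    · exact hpw.of_cons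
    · intro z hz y hy
      have hy' : y ∈ heappushLex acc x := by rw [hx]; exact hy
      rcases mem_heappushLex hy' with h | h
      · subst h
        exact (List.pairwise_cons.mp hpw).1 z hz
      · exact lt_trans (hgt x (by simp) y h) ((List.pairwise_cons.mp hpw).1 z hz)

-- A's heap-building loop produces exactly the pre-sorted list
theorem build_eq (food_times : List Int) :
    (PySem.List.pyRange 0 (PySem.List.len food_times) 1).foldl
      (fun q i => heappushLex q (PySem.List.pyGetD food_times i 0, i + 1)) [] =
    PySem.List.sorted ((PySem.List.enumerate food_times 0).map (fun q => (q.2, q.1 + 1))) (fun x => x.1) false := by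
  have h1 : (PySem.List.pyRange 0 (PySem.List.len food_times) 1).foldl
      (fun q i => heappushLex q (PySem.List.pyGetD food_times i 0, i + 1)) [] =
      ((PySem.List.enumerate food_times 0).map (fun q => (q.2, q.1 + 1))).foldl heappushLex [] := by
    rw [PySem.List.enumerate_eq_map_pyRange food_times 0, List.map_map, List.foldl_map]
    rfl
  rw [h1, PySem.List.sorted_eq_foldl_insertBy]
  apply foldl_push_eq_foldl_fst
  · have := PySem.List.pairwise_lt_enumerate food_times 0
    exact List.Pairwise.map _ (by intro a b h; simpa using h) this
  · intro x _ y hy; simp at hy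

theorem pyGet?_map {α β : Type} (f : α → β) (l : List α) (i : Int) :
    PySem.List.pyGet? (l.map f) i = (PySem.List.pyGet? l i).map f := by
  simp only [PySem.List.pyGet?, List.length_map]
  cases PySem.List.pyIdx? l.length i with
  | none => rfl
  | some n => simp [List.getElem?_map]

-- sorting pairs by number then taking the numbers = sorting the numbers
theorem sorted_map_snd (l : List (Int × Int)) :
    (PySem.List.sorted l (fun x => x.2) false).map Prod.snd =
    PySem.List.sorted (l.map Prod.snd) (fun x => x) false := by
  exact (PySem.List.sorted_id_eq_of_perm_of_pairwise _ _
    (List.Perm.map _ (PySem.List.sorted_perm l (fun x => x.2) false))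
    (List.Pairwise.map _ (by intro a b h; exact h) (PySem.List.sorted_pairwise l (fun x => x.2)))).symm

theorem loop_eq (order : List (Int × Int)) :
    ∀ (fuel p : Nat) (prev k : Int), p + fuel = order.length →
      aLoop (order.drop p) prev k ((order.length : Int) - p) = bWalk order p prev k := by
  intro fuel
  induction fuel with
  | zero =>
    intro p prev k hp
    have hdrop : order.drop p = [] := List.drop_eq_nil_of_le (by omega)
    rw [bWalk, hdrop]
    simp [aLoop, show ¬ p < order.length by omega]
  | succ m ih =>
    intro p prev k hp
    have hlt : p < order.length := by omega
    have hdrop : order.drop p = order[p] :: order.drop (p + 1) :=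
      List.drop_eq_getElem_cons hlt
    rw [bWalk]
    simp only [hlt, dif_pos]
    rw [hdrop]
    set x := order[p] with hx
    obtain ⟨t0, i0⟩ := x
    simp only [aLoop]
    by_cases hif : (t0 - prev) * ((order.length : Int) - p) ≤ k
    · simp only [hif, if_pos]
      have := ih (p + 1) t0 (k - (t0 - prev) * ((order.length : Int) - p)) (by omega)
      rw [← this]
      congr 1
      push_cast; ring
    · simp only [hif, if_neg, not_false_eq_true]
      rw [← hdrop, ← sorted_map_snd, pyGet?_map]
      cases PySem.List.pyGet? (PySem.List.sorted (order.drop p) (fun x => x.2) false)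
        (PySem.Int.mod k ((order.length : Int) - p)) with
      | none => rfl
      | some pr => rfl

-- ===== new B-side lemmas =====

theorem cost_mono (ft : List Int) {x y : Int} (h : x ≤ y) : pvCost ft x ≤ pvCost ft y := by
  induction ft with
  | nil => simp [pvCost]
  | cons a t ih =>
    simp only [pvCost, List.map_cons, List.sum_cons] at *
    have : min a x ≤ min a y := by omega
    omega

theorem cost_le_sum (ft : List Int) (x : Int) : pvCost ft x ≤ ft.sum := by
  induction ft with
  | nil => simp [pvCost]
  | cons a t ih =>
    simp only [pvCost, List.map_cons, List.sum_cons] at *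
    have : min a x ≤ a := min_le_left _ _
    omega

theorem cost_eq_sum_of_le (ft : List Int) (x : Int) (h : ∀ t ∈ ft, t ≤ x) :
    pvCost ft x = ft.sum := by
  induction ft with
  | nil => simp [pvCost]
  | cons a t ih =>
    simp only [pvCost, List.map_cons, List.sum_cons] at *
    have h1 : a ≤ x := h a (by simp)
    have h2 := ih (fun t ht => h t (by simp [ht]))
    have : min a x = a := min_eq_left h1
    omega

theorem bsearch_spec_aux (ft : List Int) (k : Int) :
    ∀ (n : Nat) (lo hi : Int), (hi - lo).toNat ≤ n → lo ≤ hi → k < pvCost ft hi →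
      lo ≤ pvBsearch ft k lo hi ∧ pvBsearch ft k lo hi ≤ hi ∧
      k < pvCost ft (pvBsearch ft k lo hi) ∧
      (∀ y, lo ≤ y → y < pvBsearch ft k lo hi → pvCost ft y ≤ k) := by
  intro n
  induction n with
  | zero =>
    intro lo hi hn hle hhi
    have heq : lo = hi := by omega
    rw [pvBsearch]
    simp only [show ¬ lo < hi by omega, if_false]
    exact ⟨le_refl _, hle, heq ▸ hhi, fun y h1 h2 => absurd (lt_of_le_of_lt h1 h2) (lt_irrefl _)⟩
  | succ m ih =>
    intro lo hi hn hle hhi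
    by_cases hlt : lo < hi
    · rw [pvBsearch]
      simp only [hlt, if_true]
      have hmid : lo ≤ PySem.Int.floordiv (lo + hi) 2 ∧ PySem.Int.floordiv (lo + hi) 2 < hi := by
        rw [PySem.Int.floordiv_eq_ediv_of_pos (by omega : (0:Int) < 2)]
        omega
      set mid := PySem.Int.floordiv (lo + hi) 2 with hmiddef
      by_cases hc : k < pvCost ft mid
      · simp only [hc, if_true]
        obtain ⟨h1, h2, h3, h4⟩ := ih lo mid (by omega) (by omega) hc
        exact ⟨h1, by omega, h3, h4⟩
      · simp only [hc, if_false]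
        obtain ⟨h1, h2, h3, h4⟩ := ih (mid + 1) hi (by omega) (by omega) hhi
        refine ⟨by omega, h2, h3, ?_⟩
        intro y hy1 hy2
        by_cases hym : y ≤ mid
        · exact le_trans (cost_mono ft hym) (by omega)
        · exact h4 y (by omega) hy2
    · rw [pvBsearch]
      simp only [hlt, if_false]
      have heq : lo = hi := by omega
      exact ⟨le_refl _, hle, heq ▸ hhi, fun y h1 h2 => absurd (lt_of_le_of_lt h1 h2) (lt_irrefl _)⟩

theorem bsearch_spec (ft : List Int) (k : Int) :
    ∀ (lo hi : Int), lo ≤ hi → k < pvCost ft hi →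
      lo ≤ pvBsearch ft k lo hi ∧ pvBsearch ft k lo hi ≤ hi ∧
      k < pvCost ft (pvBsearch ft k lo hi) ∧
      (∀ y, lo ≤ y → y < pvBsearch ft k lo hi → pvCost ft y ≤ k) := by
  intro lo hi
  exact bsearch_spec_aux ft k (hi - lo).toNat lo hi (le_refl _)


-- the value B computes after its guards, as a function of the threshold x
def bAnswer (ft : List Int) (k x : Int) : Int :=
  let eatenL := ft.filter (fun t => decide (t < x))
  let prev := (PySem.List.max? eatenL (fun t => t)).getD 0
  let r := k - (eatenL.sum + ((ft.length : Int) - eatenL.length) * prev)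
  match PySem.List.pyGet?
      (((PySem.List.enumerate ft 0).filter (fun q => decide (x ≤ q.2))).map (fun q => q.1 + 1))
      (PySem.Int.mod r ((ft.length : Int) - eatenL.length)) with
  | some v => v
  | none => -1

theorem alt_eq (ft : List Int) (k : Int) (h1 : ¬ ft.length = 0) (h2 : ¬ ft.sum ≤ k) :
    solution_alt ft k = bAnswer ft k (pvBsearch ft k
      ((PySem.List.min? ft (fun t => t)).getD 0) ((PySem.List.max? ft (fun t => t)).getD 0)) := by
  simp only [solution_alt, bAnswer, if_neg h1, if_neg h2]

-- Σ min(t,x) over ft splits at a position p where take ≤ t ≤ drop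
theorem cost_split (order : List (Int × Int)) (ft : List Int) (t : Int) (p : Nat)
    (hfst : (order.map Prod.fst).Perm ft) (hp : p ≤ order.length)
    (h1 : ∀ a ∈ order.take p, a.1 ≤ t)
    (h2 : ∀ a ∈ order.drop p, t ≤ a.1) :
    pvCost ft t = ((order.take p).map Prod.fst).sum + ((order.length : Int) - p) * t := by
  have hperm := (hfst.map (fun a => min a t)).sum_eq
  unfold pvCost
  rw [← hperm, List.map_map]
  conv_lhs => rw [← List.take_append_drop p order]
  rw [List.map_append, List.sum_append]
  have e1 : (order.take p).map ((fun a => min a t) ∘ Prod.fst) = (order.take p).map Prod.fst := by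
    apply List.map_congr_left; intro a ha
    simp [min_eq_left (h1 a ha)]
  have e2 : (order.drop p).map ((fun a => min a t) ∘ Prod.fst) =
      List.replicate (order.length - p) t := by
    rw [show order.length - p = ((order.drop p).map ((fun a => min a t) ∘ Prod.fst)).length by
      simp]
    apply List.eq_replicate_of_mem
    intro b hb
    obtain ⟨a, ha, rfl⟩ := List.mem_map.mp hb
    simp [min_eq_right (h2 a ha)]
  rw [e1, e2, List.sum_replicate, nsmul_eq_mul]
  have : ((order.length - p : Nat) : Int) = (order.length : Int) - p := by omega
  rw [this]

-- membership of take/drop as index facts under a fst-sorted list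
theorem take_le (order : List (Int × Int))
    (hsorted : List.Pairwise (fun a b : Int × Int => a.1 ≤ b.1) order)
    (p : Nat) (hp : p < order.length) :
    ∀ a ∈ order.take p, a.1 ≤ (order[p]).1 := by
  intro a ha
  obtain ⟨i, hi, hieq⟩ := List.getElem_of_mem ha
  have hi' : i < p := by
    have := hi; rw [List.length_take] at this; omega
  have hilen : i < order.length := by omega
  have : (order.take p)[i] = order[i] := List.getElem_take
  rw [this] at hieq
  subst hieq
  exact (List.pairwise_iff_getElem.mp hsorted) i p hilen hp hi'

theorem drop_ge (order : List (Int × Int))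
    (hsorted : List.Pairwise (fun a b : Int × Int => a.1 ≤ b.1) order)
    (p : Nat) (hp : p < order.length) :
    ∀ a ∈ order.drop p, (order[p]).1 ≤ a.1 := by
  intro a ha
  obtain ⟨i, hi, hieq⟩ := List.getElem_of_mem ha
  have hlen : (order.drop p).length = order.length - p := List.length_drop ..
  have hilen : p + i < order.length := by omega
  have : (order.drop p)[i] = order[p + i]'hilen := by
    simp [List.getElem_drop]
  rw [this] at hieq
  subst hieq
  rcases Nat.eq_zero_or_pos i with h0 | h0
  · subst h0; simp
  · exact (List.pairwise_iff_getElem.mp hsorted) p (p + i) hp hilen (by omega)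


-- invariant form of the previous-time/remaining-budget bookkeeping
def walkInv (order : List (Int × Int)) (p : Nat) (prev : Int) : Prop :=
  (p = 0 ∧ prev = 0) ∨ (0 < p ∧ ∃ _ : p - 1 < order.length, prev = (order[p-1]).1)

-- the step condition of the walk is exactly cost (order[p].1) ≤ k
theorem cond_iff (order : List (Int × Int)) (ft : List Int) (k : Int)
    (hfst : (order.map Prod.fst).Perm ft)
    (hsorted : List.Pairwise (fun a b : Int × Int => a.1 ≤ b.1) order)
    (p : Nat) (hp : p < order.length) (prev kk : Int)
    (hkk : kk = k - (((order.take p).map Prod.fst).sum + ((order.length : Int) - p) * prev)) :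
    (((order[p]).1 - prev) * ((order.length : Int) - p) ≤ kk ↔ pvCost ft (order[p]).1 ≤ k) := by
  have hcost := cost_split order ft (order[p]).1 p hfst (le_of_lt hp)
    (take_le order hsorted p hp) (drop_ge order hsorted p hp)
  rw [hcost, hkk]
  constructor
  · intro h; nlinarith [h]
  · intro h; nlinarith [h]

theorem walk_all (order : List (Int × Int)) (ft : List Int) (k : Int)
    (hfst : (order.map Prod.fst).Perm ft)
    (hsorted : List.Pairwise (fun a b : Int × Int => a.1 ≤ b.1) order)
    (hsum : ft.sum ≤ k) :
    ∀ (fuel p : Nat) (prev kk : Int), p + fuel = order.length →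
      walkInv order p prev →
      kk = k - (((order.take p).map Prod.fst).sum + ((order.length : Int) - p) * prev) →
      bWalk order p prev kk = -1 := by
  intro fuel
  induction fuel with
  | zero =>
    intro p prev kk hp _ _
    rw [bWalk]
    simp [show ¬ p < order.length by omega]
  | succ m ih =>
    intro p prev kk hp hinv hkk
    have hplt : p < order.length := by omega
    have hcond : ((order[p]).1 - prev) * ((order.length : Int) - p) ≤ kk :=
      (cond_iff order ft k hfst hsorted p hplt prev kk hkk).mpr
        (le_trans (cost_le_sum ft _) hsum)
    rw [bWalk]
    simp only [hplt, dif_pos, hcond, if_pos]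
    apply ih (p + 1) (order[p]).1 _ (by omega)
    · right
      exact ⟨by omega, by simpa using hplt, by simp⟩
    · have hsp1 : ((order.take (p+1)).map Prod.fst).sum =
          ((order.take p).map Prod.fst).sum + (order[p]).1 := by
        rw [List.map_take, List.map_take, List.take_add_one,
          List.getElem?_eq_getElem (by simpa using hplt), List.sum_append]
        simp
      rw [hkk, hsp1]
      push_cast
      ring

theorem walk_main (order : List (Int × Int)) (ft : List Int) (k x : Int)
    (hfst : (order.map Prod.fst).Perm ft)
    (hsorted : List.Pairwise (fun a b : Int × Int => a.1 ≤ b.1) order)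
    (hperm : order.Perm ((PySem.List.enumerate ft 0).map (fun q => (q.2, q.1 + 1))))
    (hx : k < pvCost ft x)
    (hbelow : ∀ t ∈ ft, t < x → pvCost ft t ≤ k)
    (hsum : ¬ ft.sum ≤ k) (hne : ft ≠ []) :
    ∀ (fuel p : Nat) (prev kk : Int), p + fuel = order.length →
      (∀ i (hilen : i < order.length), i < p → (order[i]).1 < x) →
      walkInv order p prev →
      kk = k - (((order.take p).map Prod.fst).sum + ((order.length : Int) - p) * prev) →
      bWalk order p prev kk = bAnswer ft k x := by
  intro fuel
  induction fuel with
  | zero =>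
    intro p prev kk hp hlt _ _
    exfalso
    have hall : ∀ t ∈ ft, t < x := by
      intro t ht
      have ht' : t ∈ order.map Prod.fst := hfst.mem_iff.mpr ht
      obtain ⟨a, ha, rfl⟩ := List.mem_map.mp ht'
      obtain ⟨i, hi, rfl⟩ := List.getElem_of_mem ha
      exact hlt i hi (by omega)
    obtain ⟨mx, hmx⟩ : ∃ mx, PySem.List.max? ft (fun t => t) = some mx := by
      cases h : PySem.List.max? ft (fun t => t) with
      | none => exact absurd ((PySem.List.max?_eq_none_iff _ _).mp h) hne
      | some m => exact ⟨m, rfl⟩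
    have hmem := PySem.List.max?_mem hmx
    have hmax := PySem.List.max?_isMax hmx
    have : pvCost ft mx = ft.sum := cost_eq_sum_of_le ft mx hmax
    exact hsum (this ▸ hbelow mx hmem (hall mx hmem))
  | succ m ih =>
    intro p prev kk hp hlt hinv hkk
    have hplt : p < order.length := by omega
    have hcond := cond_iff order ft k hfst hsorted p hplt prev kk hkk
    have htmem : (order[p]).1 ∈ ft := by
      apply hfst.mem_iff.mp
      exact List.mem_map.mpr ⟨order[p], List.getElem_mem _, rfl⟩
    have hchar : pvCost ft (order[p]).1 ≤ k ↔ (order[p]).1 < x := by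
      constructor
      · intro h
        by_contra hge
        exact absurd (lt_of_le_of_lt (le_trans (cost_mono ft (by omega : x ≤ (order[p]).1)) h) hx) (lt_irrefl _)
      · exact hbelow _ htmem
    rw [bWalk]
    simp only [hplt, dif_pos]
    by_cases hstep : (order[p]).1 < x
    · rw [if_pos (hcond.mpr (hchar.mpr hstep))]
      apply ih (p + 1) (order[p]).1 _ (by omega)
      · intro i hilen hip
        rcases Nat.lt_or_ge i p with h | h
        · exact hlt i hilen h
        · have : i = p := by omega
          subst this; exact hstep
      · right
        exact ⟨by omega, by simpa using hplt, by simp⟩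
      · have hsp1 : ((order.take (p+1)).map Prod.fst).sum =
            ((order.take p).map Prod.fst).sum + (order[p]).1 := by
          rw [List.map_take, List.map_take, List.take_add_one,
            List.getElem?_eq_getElem (by simpa using hplt), List.sum_append]
          simp
        rw [hkk, hsp1]
        push_cast
        ring
    · rw [if_neg (fun hc => hstep (hchar.mp (hcond.mp hc)))]
      -- break: the remaining-foods value equals bAnswer
      have hxle : x ≤ (order[p]).1 := by omega
      -- take p are exactly the < x entries, drop p exactly the ≥ x entries
      have htake_lt : ∀ a ∈ order.take p, a.1 < x := by
        intro a ha
        obtain ⟨i, hi, hieq⟩ := List.getElem_of_mem ha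
        have hi' : i < p := by have := hi; rw [List.length_take] at this; omega
        have hilen : i < order.length := by omega
        have : (order.take p)[i] = order[i] := List.getElem_take
        rw [this] at hieq
        subst hieq
        exact hlt i hilen hi'
      have hdrop_ge : ∀ a ∈ order.drop p, x ≤ a.1 :=
        fun a ha => le_trans hxle (drop_ge order hsorted p hplt a ha)
      have hfilt_lt : order.filter (fun a => decide (a.1 < x)) = order.take p := by
        conv_lhs => rw [← List.take_append_drop p order]
        rw [List.filter_append]
        rw [List.filter_eq_self.mpr (fun a ha => by simpa using htake_lt a ha)]
        rw [List.filter_eq_nil_iff.mpr (fun a ha => by simpa using not_lt.mpr (hdrop_ge a ha))]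
        simp
      have hfilt_ge : order.filter (fun a => decide (x ≤ a.1)) = order.drop p := by
        conv_lhs => rw [← List.take_append_drop p order]
        rw [List.filter_append]
        rw [List.filter_eq_nil_iff.mpr (fun a ha => by simpa using not_le.mpr (htake_lt a ha))]
        rw [List.filter_eq_self.mpr (fun a ha => by simpa using hdrop_ge a ha)]
        simp
      -- eatenL facts
      have hEperm : ((order.take p).map Prod.fst).Perm (ft.filter (fun t => decide (t < x))) := by
        have h1 := hfst.filter (fun t => decide (t < x))
        have h2 : (order.map Prod.fst).filter ((fun t => decide (t < x))) =
            (order.filter (fun a => decide (a.1 < x))).map Prod.fst := by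
          rw [List.filter_map]
          rfl
        rw [h2, hfilt_lt] at h1
        exact h1
      have hlen_take : ((order.take p).map Prod.fst).length = p := by
        simp [List.length_take]
        omega
      have hElen : (ft.filter (fun t => decide (t < x))).length = p := by
        rw [← hEperm.length_eq, hlen_take]
      have hEsum : (ft.filter (fun t => decide (t < x))).sum = ((order.take p).map Prod.fst).sum :=
        hEperm.sum_eq.symm
      -- prev agrees with B's max-of-eaten (default 0)
      have hprevB : (PySem.List.max? (ft.filter (fun t => decide (t < x))) (fun t => t)).getD 0 = prev := by
        rcases hinv with ⟨hp0, hprev0⟩ | ⟨hppos, hq, hpreveq⟩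
        · subst hp0
          have : ft.filter (fun t => decide (t < x)) = [] := List.length_eq_zero_iff.mp hElen
          rw [this]
          simp [hprev0]
          rfl
        · have hne' : ft.filter (fun t => decide (t < x)) ≠ [] := by
            intro hnil
            rw [hnil] at hElen
            simp at hElen
            omega
          obtain ⟨mm, hmm⟩ : ∃ mm, PySem.List.max? (ft.filter (fun t => decide (t < x))) (fun t => t) = some mm := by
            cases h : PySem.List.max? (ft.filter (fun t => decide (t < x))) (fun t => t) with
            | none => exact absurd ((PySem.List.max?_eq_none_iff _ _).mp h) hne'
            | some m => exact ⟨m, rfl⟩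
          rw [hmm]
          simp only [Option.getD_some]
          have hmmem := PySem.List.max?_mem hmm
          have hmmax := PySem.List.max?_isMax hmm
          have hq' : p - 1 < order.length := hq
          -- prev = order[p-1].1 is a member of the eaten multiset and an upper bound of it
          have hprev_mem : prev ∈ (order.take p).map Prod.fst := by
        -- (filled below)
            rw [hpreveq]
            apply List.mem_map.mpr
            refine ⟨order[p-1], ?_, rfl⟩
            have : (order.take p)[p-1]'(by rw [List.length_take]; omega) = order[p-1] :=
              List.getElem_take
            rw [← this]
            exact List.getElem_mem _
          have hprev_ub : ∀ y ∈ (order.take p).map Prod.fst, y ≤ prev := by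
            intro y hy
            obtain ⟨a, ha, rfl⟩ := List.mem_map.mp hy
            obtain ⟨i, hi, hieq⟩ := List.getElem_of_mem ha
            have hi' : i < p := by have := hi; rw [List.length_take] at this; omega
            have hilen : i < order.length := by omega
            have : (order.take p)[i] = order[i] := List.getElem_take
            rw [this] at hieq
            subst hieq
            rw [hpreveq]
            rcases Nat.lt_or_ge i (p-1) with h | h
            · exact (List.pairwise_iff_getElem.mp hsorted) i (p-1) hilen hq' h
            · have : i = p - 1 := by omega
              subst this; exact le_refl _
          have h1 : mm ≤ prev := hprev_ub mm (hEperm.mem_iff.mpr hmmem)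
          have h2 : prev ≤ mm := hmmax prev (hEperm.mem_iff.mp hprev_mem)
          omega
      -- remaining list agrees
      have hrem : PySem.List.sorted ((order.drop p).map Prod.snd) (fun y => y) false =
          ((PySem.List.enumerate ft 0).filter (fun q => decide (x ≤ q.2))).map (fun q => q.1 + 1) := by
        apply PySem.List.sorted_eq_of_perm_of_pairwise_lt
        · -- perm
          have h1 := hperm.filter (fun a => decide (x ≤ a.1))
          rw [hfilt_ge] at h1
          have h2 : ((PySem.List.enumerate ft 0).map (fun q => (q.2, q.1 + 1))).filter
              (fun a => decide (x ≤ a.1)) =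
              ((PySem.List.enumerate ft 0).filter (fun q => decide (x ≤ q.2))).map
                (fun q => (q.2, q.1 + 1)) := by
            rw [List.filter_map]
            rfl
          rw [h2] at h1
          have h3 := h1.map Prod.snd
          rw [List.map_map] at h3
          exact h3.symm
        · -- pairwise <
          have h1 := PySem.List.pairwise_lt_enumerate ft 0
          have h2 := List.Pairwise.sublist (List.filter_sublist (p := fun q => decide (x ≤ q.2))) h1
          exact h2.map _ (by intro a b h; omega)
      have hkkr : kk = k - ((ft.filter (fun t => decide (t < x))).sum +
          ((ft.length : Int) - (ft.filter (fun t => decide (t < x))).length) *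
            ((PySem.List.max? (ft.filter (fun t => decide (t < x))) (fun t => t)).getD 0)) := by
        rw [hEsum, hElen, hprevB, hkk, hfst.length_eq.symm]
        simp
      have hlenft : (ft.length : Int) = (order.length : Int) := by
        rw [← hfst.length_eq]
        simp
      simp only [bAnswer]
      rw [← hrem, ← hkkr, hElen, hlenft]

-- ===== VERDICT (by name: the statement is the Claim_ definition above) =====
theorem solution_spec : Claim_equal_solution := by
  intro ft k _
  unfold Spec_solution solution
  rw [build_eq]
  set order := PySem.List.sorted
    ((PySem.List.enumerate ft 0).map (fun q => (q.2, q.1 + 1))) (fun x => x.1) false with horder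
  have hperm : order.Perm ((PySem.List.enumerate ft 0).map (fun q => (q.2, q.1 + 1))) :=
    PySem.List.sorted_perm _ _ _
  have hfst : (order.map Prod.fst).Perm ft := by
    have h1 := hperm.map Prod.fst
    rw [List.map_map] at h1
    have h2 : (PySem.List.enumerate ft 0).map (Prod.fst ∘ (fun q : Int × Int => (q.2, q.1+1))) =
        (PySem.List.enumerate ft 0).map (fun x => x.2) :=
      List.map_congr_left (fun a _ => rfl)
    rw [h2, PySem.List.map_snd_enumerate] at h1
    exact h1
  have hsorted : List.Pairwise (fun a b : Int × Int => a.1 ≤ b.1) order :=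
    PySem.List.sorted_pairwise _ _
  have hlen : PySem.List.len ft = (order.length : Int) := by
    simp [horder, PySem.List.len, PySem.List.length_sorted, PySem.List.length_enumerate]
  rw [hlen]
  have hA : aLoop order 0 k ((order.length : Int)) = bWalk order 0 0 k := by
    have := loop_eq order order.length 0 0 k (by omega)
    simpa using this
  rw [hA]
  by_cases h0 : ft.length = 0
  · have hfte : ft = [] := List.length_eq_zero_iff.mp h0
    subst hfte
    have hord0 : order = [] := by
      apply List.length_eq_zero_iff.mp
      have := hfst.length_eq
      simpa using this
    rw [hord0, bWalk]
    simp [solution_alt]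
  · by_cases hs : ft.sum ≤ k
    · rw [walk_all order ft k hfst hsorted hs order.length 0 0 k (by omega)
        (Or.inl ⟨rfl, rfl⟩) (by simp)]
      simp [solution_alt, hs]
    · have hne : ft ≠ [] := by intro h; subst h; simp at h0
      obtain ⟨mn, hmn⟩ : ∃ mn, PySem.List.min? ft (fun t => t) = some mn := by
        cases h : PySem.List.min? ft (fun t => t) with
        | none => exact absurd ((PySem.List.min?_eq_none_iff _ _).mp h) hne
        | some m => exact ⟨m, rfl⟩
      obtain ⟨mx, hmx⟩ : ∃ mx, PySem.List.max? ft (fun t => t) = some mx := by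
        cases h : PySem.List.max? ft (fun t => t) with
        | none => exact absurd ((PySem.List.max?_eq_none_iff _ _).mp h) hne
        | some m => exact ⟨m, rfl⟩
      have hmxmem := PySem.List.max?_mem hmx
      have hmnmin := PySem.List.min?_isMin hmn
      have hmxmax := PySem.List.max?_isMax hmx
      have hcosthi : pvCost ft mx = ft.sum := cost_eq_sum_of_le ft mx hmxmax
      have hkhi : k < pvCost ft mx := by rw [hcosthi]; omega
      obtain ⟨hx1, hx2, hx3, hx4⟩ := bsearch_spec ft k mn mx (hmnmin mx hmxmem) hkhi
      have hbelow : ∀ t ∈ ft, t < pvBsearch ft k mn mx → pvCost ft t ≤ k :=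
        fun t ht hlt => hx4 t (hmnmin t ht) hlt
      rw [walk_main order ft k (pvBsearch ft k mn mx) hfst hsorted hperm hx3 hbelow hs hne
        order.length 0 0 k (by omega) (fun i hi h => absurd h (Nat.not_lt_zero i))
        (Or.inl ⟨rfl, rfl⟩) (by simp)]
      rw [alt_eq ft k h0 hs, hmn, hmx]
      rfl
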